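-- pv_equiv track=rewrite | github.com/sweer1234/FactorAI | server/app/api.py | _next_template_version
-- ===== SOURCE A (Python) =====
-- def _next_template_version(existing_versions: list[str]) -> str:
--     semver_parts: list[tuple[int, int, int]] = []
--     for item in existing_versions:
--         parts = item.split(".")
--         if len(parts) != 3:
--             continue
--         try:
--             semver_parts.append((int(parts[0]), int(parts[1]), int(parts[2])))
--         except ValueError:
--             continue
--     if not semver_parts:
--         return f"1.0.{len(existing_versions) + 1}"
--     major, minor, patch = sorted(semver_parts)[-1]
--     return f"{major}.{minor}.{patch + 1}"
-- ===== SOURCE B (Python) =====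
-- def _parse(item):
--     parts = item.split(".")
--     if len(parts) != 3:
--         return None
--     try:
--         return (int(parts[0]), int(parts[1]), int(parts[2]))
--     except ValueError:
--         return None
--
--
-- def _next_template_version(existing_versions: list[str]) -> str:
--     best = None
--     for item in existing_versions:
--         t = _parse(item)
--         if t is not None and (best is None or t > best):
--             best = t
--     if best is None:
--         return f"1.0.{len(existing_versions) + 1}"
--     major, minor, patch = best
--     return f"{major}.{minor}.{patch + 1}"
-- ===== Notes on version B (the rewrite author's own statement) =====
-- stated objective: simpler
-- what changed: Single streaming pass keeping a running maximum tuple instead of collecting all parsed triples into a list and sorting it; no intermediate list and no sort.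
import Mathlib
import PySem

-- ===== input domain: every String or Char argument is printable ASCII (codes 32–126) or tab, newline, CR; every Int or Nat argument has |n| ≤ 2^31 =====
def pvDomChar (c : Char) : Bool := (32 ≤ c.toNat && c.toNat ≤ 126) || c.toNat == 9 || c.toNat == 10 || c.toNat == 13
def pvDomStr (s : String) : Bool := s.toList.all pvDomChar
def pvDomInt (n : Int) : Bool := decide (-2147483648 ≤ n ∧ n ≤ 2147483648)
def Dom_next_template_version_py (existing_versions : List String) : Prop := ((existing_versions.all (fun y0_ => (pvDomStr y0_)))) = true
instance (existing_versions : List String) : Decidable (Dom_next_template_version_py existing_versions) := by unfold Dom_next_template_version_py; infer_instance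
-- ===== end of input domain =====

-- B replaces collect-all-then-sort by one streaming pass keeping a running maximum triple (simpler: no intermediate list, no sort).

-- ===== PORT A =====
-- lexicographic key: Python sorts int 3-tuples lexicographically
def pvKeyA (t : Int × Int × Int) : Lex (Int × Lex (Int × Int)) := toLex (t.1, toLex t.2)

def next_template_version_py (existing_versions : List String) : String :=
  let semver_parts : List (Int × Int × Int) :=
    existing_versions.foldl (fun acc item =>
      let parts := (PySem.Str.split? item ".").getD []   -- sep "." ≠ "", always some
      if parts.length ≠ 3 then acc
      else
        match PySem.Int.ofStr? (parts.getD 0 ""), PySem.Int.ofStr? (parts.getD 1 ""),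
              PySem.Int.ofStr? (parts.getD 2 "") with
        | some a, some b, some c => acc ++ [(a, b, c)]
        | _, _, _ => acc) []
  if semver_parts = [] then
    String.mk ('1' :: '.' :: '0' :: '.' :: PySem.Int.toChars ((existing_versions.length : Int) + 1))
  else
    match PySem.List.pyGet? (PySem.List.sorted semver_parts pvKeyA false) (-1) with
    | some (ma, mi, pa) =>
        String.mk (PySem.Int.toChars ma ++ '.' :: PySem.Int.toChars mi ++ '.' :: PySem.Int.toChars (pa + 1))
    | none => ""   -- unreachable: the sorted list is nonempty here

-- ===== PORT B =====
-- lexicographic key: Python's 't > best' compares int 3-tuples lexicographically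
def pvKeyB (t : Int × Int × Int) : Lex (Int × Lex (Int × Int)) := toLex (t.1, toLex t.2)

def pvParse (item : String) : Option (Int × Int × Int) :=
  let parts := (PySem.Str.split? item ".").getD []   -- sep "." ≠ "", always some
  if parts.length ≠ 3 then none
  else
    match PySem.Int.ofStr? (parts.getD 0 "") with
    | none => none
    | some a =>
      match PySem.Int.ofStr? (parts.getD 1 "") with
      | none => none
      | some b =>
        match PySem.Int.ofStr? (parts.getD 2 "") with
        | none => none
        | some c => some (a, b, c)

def next_template_version_py_alt (existing_versions : List String) : String :=
  let best : Option (Int × Int × Int) :=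
    existing_versions.foldl (fun best item =>
      match pvParse item with
      | none => best
      | some t =>
        match best with
        | none => some t
        | some b => if pvKeyB b < pvKeyB t then some t else best) none
  match best with
  | none =>
      String.mk ('1' :: '.' :: '0' :: '.' :: PySem.Int.toChars ((existing_versions.length : Int) + 1))
  | some (ma, mi, pa) =>
      String.mk (PySem.Int.toChars ma ++ '.' :: PySem.Int.toChars mi ++ '.' :: PySem.Int.toChars (pa + 1))

-- ===== PRECONDITION & SPEC =====
def Spec_next_template_version_py (existing_versions : List String) (out : String) : Prop := out = next_template_version_py_alt existing_versions
instance (existing_versions : List String) (out : String) : Decidable (Spec_next_template_version_py existing_versions out) := by unfold Spec_next_template_version_py; infer_instance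

-- ===== CLAIM (what is proved, stated in full; the proofs are below) =====
def Claim_equal_next_template_version_py : Prop := ∀ (existing_versions : List String), Dom_next_template_version_py existing_versions → Spec_next_template_version_py existing_versions (next_template_version_py existing_versions)

-- ===== LEMMAS AND PROOFS =====

-- running max over a list of triples
def pvBmax (b t : Int × Int × Int) : Int × Int × Int := if pvKeyB b < pvKeyB t then t else b

theorem pvKeyB_inj {a b : Int × Int × Int} (h : pvKeyB a = pvKeyB b) : a = b := by
  simp [pvKeyB, Prod.ext_iff] at h; exact Prod.ext h.1 (Prod.ext h.2.1 h.2.2)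

-- A's fold collects exactly filterMap pvParse
theorem foldA_step (acc : List (Int × Int × Int)) (item : String) :
    (let parts := (PySem.Str.split? item ".").getD []
     if parts.length ≠ 3 then acc
     else
       match PySem.Int.ofStr? (parts.getD 0 ""), PySem.Int.ofStr? (parts.getD 1 ""),
             PySem.Int.ofStr? (parts.getD 2 "") with
       | some a, some b, some c => acc ++ [(a, b, c)]
       | _, _, _ => acc)
    = match pvParse item with
      | some x => acc ++ [x]
      | none => acc := by
  unfold pvParse
  by_cases hl : ((PySem.Str.split? item ".").getD []).length ≠ 3
  · rw [if_pos hl, if_pos hl]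
  · rw [if_neg hl, if_neg hl]
    rcases PySem.Int.ofStr? (((PySem.Str.split? item ".").getD []).getD 0 "") with _ | a <;>
    rcases PySem.Int.ofStr? (((PySem.Str.split? item ".").getD []).getD 1 "") with _ | b <;>
    rcases PySem.Int.ofStr? (((PySem.Str.split? item ".").getD []).getD 2 "") with _ | c <;> rfl

theorem foldA_eq (l : List String) (acc : List (Int × Int × Int)) :
    l.foldl (fun acc item =>
      let parts := (PySem.Str.split? item ".").getD []
      if parts.length ≠ 3 then acc
      else
        match PySem.Int.ofStr? (parts.getD 0 ""), PySem.Int.ofStr? (parts.getD 1 ""),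
              PySem.Int.ofStr? (parts.getD 2 "") with
        | some a, some b, some c => acc ++ [(a, b, c)]
        | _, _, _ => acc) acc = acc ++ l.filterMap pvParse := by
  induction l generalizing acc with
  | nil => simp
  | cons h t ih =>
      rw [List.foldl_cons, foldA_step, List.filterMap_cons]
      cases hp : pvParse h with
      | none => exact ih acc
      | some x => rw [ih]; simp

-- B's fold is the running max of filterMap pvParse
theorem foldB_eq (l : List String) (b : Option (Int × Int × Int)) :
    l.foldl (fun best item =>
      match pvParse item with
      | none => best
      | some t =>
        match best with
        | none => some t
        | some b => if pvKeyB b < pvKeyB t then some t else best) b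
    = (l.filterMap pvParse).foldl (fun best t =>
        match best with
        | none => some t
        | some b => if pvKeyB b < pvKeyB t then some t else best) b := by
  induction l generalizing b with
  | nil => simp
  | cons h t ih =>
      simp only [List.foldl_cons, List.filterMap_cons]
      cases pvParse h <;> simp [ih]

theorem foldB_some (ps : List (Int × Int × Int)) (b : Int × Int × Int) :
    ps.foldl (fun best t =>
        match best with
        | none => some t
        | some b => if pvKeyB b < pvKeyB t then some t else best) (some b)
    = some (ps.foldl pvBmax b) := by
  induction ps generalizing b with
  | nil => rfl
  | cons h t ih => simp only [List.foldl_cons, pvBmax]; split <;> exact ih _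

theorem bmax_mem (t : List (Int × Int × Int)) (x : Int × Int × Int) :
    t.foldl pvBmax x = x ∨ t.foldl pvBmax x ∈ t := by
  induction t generalizing x with
  | nil => simp
  | cons h t ih =>
      simp only [List.foldl_cons, pvBmax, List.mem_cons]
      split
      · rcases ih h with h' | h' <;> simp [h']
      · rcases ih x with h' | h' <;> simp [h']

theorem bmax_ge (t : List (Int × Int × Int)) (x : Int × Int × Int) :
    pvKeyB x ≤ pvKeyB (t.foldl pvBmax x) ∧ ∀ y ∈ t, pvKeyB y ≤ pvKeyB (t.foldl pvBmax x) := by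
  induction t generalizing x with
  | nil => simp
  | cons h t ih =>
      simp only [List.foldl_cons, pvBmax, List.mem_cons]
      split
      · rename_i hlt
        rcases ih h with ⟨h1, h2⟩
        exact ⟨le_trans (le_of_lt hlt) h1, fun y hy => hy.elim (fun e => e ▸ h1) (h2 y)⟩
      · rename_i hlt
        rcases ih x with ⟨h1, h2⟩
        exact ⟨h1, fun y hy => hy.elim (fun e => e ▸ le_trans (le_of_not_gt hlt) h1) (h2 y)⟩

theorem pairwise_getLast {α : Type} {R : α → α → Prop}
    {s : List α} (hp : s.Pairwise R) {lst : α} (h : s.getLast? = some lst) :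
    ∀ y ∈ s, R y lst ∨ y = lst := by
  induction s with
  | nil => simp at h
  | cons a t ih =>
      intro y hy
      cases ht : t with
      | nil =>
          subst ht
          simp at h hy
          subst h; subst hy; exact Or.inr rfl
      | cons b u =>
          have hlast : t.getLast? = some lst := by
            rw [ht] at h ⊢
            simpa [List.getLast?_cons_cons] using h
          have hlm : lst ∈ t := List.mem_of_getLast? hlast
          rcases List.mem_cons.mp hy with rfl | hyt
          · exact Or.inl ((List.pairwise_cons.mp hp).1 lst hlm)
          · exact ih (List.pairwise_cons.mp hp).2 hlast y hyt

-- last element of the sorted list is the running max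
theorem sorted_last (x : Int × Int × Int) (t : List (Int × Int × Int)) :
    PySem.List.pyGet? (PySem.List.sorted (x :: t) pvKeyA false) (-1) = some (t.foldl pvBmax x) := by
  rw [PySem.List.pyGet?_neg_one]
  set m := t.foldl pvBmax x with hm
  have hperm : (PySem.List.sorted (x :: t) pvKeyA false).Perm (x :: t) :=
    PySem.List.sorted_perm (x :: t) pvKeyA false
  have hne : PySem.List.sorted (x :: t) pvKeyA false ≠ [] := by
    intro h0; have := hperm.length_eq; rw [h0] at this; simp at this
  rcases hlast : (PySem.List.sorted (x :: t) pvKeyA false).getLast? with _ | lst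
  · exact absurd (List.getLast?_eq_none_iff.mp hlast) hne
  have hpw : (PySem.List.sorted (x :: t) pvKeyA false).Pairwise
      (fun a b => pvKeyA a ≤ pvKeyA b) := PySem.List.sorted_pairwise (x :: t) pvKeyA
  have hm_mem : m ∈ x :: t := by
    rcases bmax_mem t x with h | h
    · exact h ▸ List.mem_cons_self
    · exact List.mem_cons_of_mem _ h
  have hlst_mem : lst ∈ x :: t := hperm.mem_iff.mp (List.mem_of_getLast? hlast)
  have hlst_le : pvKeyB lst ≤ pvKeyB m := by
    rcases List.mem_cons.mp hlst_mem with h | h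
    · exact h ▸ (bmax_ge t x).1
    · exact (bmax_ge t x).2 lst h
  have hm_le : pvKeyB m ≤ pvKeyB lst := by
    rcases pairwise_getLast hpw hlast m (hperm.mem_iff.mpr hm_mem) with h | h
    · exact h
    · exact h ▸ le_refl _
  have : m = lst := pvKeyB_inj (le_antisymm hm_le hlst_le)
  rw [this]

-- ===== VERDICT (by name: the statement is the Claim_ definition above) =====
theorem next_template_version_py_spec : Claim_equal_next_template_version_py := by
  intro l _
  unfold Spec_next_template_version_py next_template_version_py next_template_version_py_alt
  simp only [foldA_eq, foldB_eq, List.nil_append]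
  cases hps : l.filterMap pvParse with
  | nil => simp
  | cons x t =>
      simp only [foldB_some, List.foldl_cons, sorted_last]
      simp
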